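-- pv_equiv track=rewrite | github.com/Abrahamsen3/cortex | src/cortex/tools/editor/text.py | _line_col_to_offset
-- ===== SOURCE A (Python) =====
-- def _line_col_to_offset(text: str, line: int, col: int) -> int:
--     """
--     Convert a line and column position to a character offset in the text.
--
--     Args:
--         text: The text content of the file.
--         line: 0-indexed line number.
--         col: 0-indexed column number.
--
--     Returns:
--         Character offset from the beginning of the text to the specified position.
--
--     Raises:
--         ValueError: If line or column is negative, line is out of range, or
--             column is out of range for the specified line.
--     """
--     if line < 0 or col < 0:
--         raise ValueError(f"Negative line/column not allowed: line={line}, col={col}")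
--     if line == 0:
--         if col > len(text.split("\n", 1)[0]):
--             raise ValueError(f"Column out of range for line 0: {col}")
--         return col
--     current_line = 0
--     offset = 0
--     text_len = len(text)
--     while current_line < line and offset < text_len:
--         newline_idx = text.find("\n", offset)
--         if newline_idx == -1:
--             raise ValueError(f"Line out of range: {line}")
--         offset = newline_idx + 1
--         current_line += 1
--     if current_line != line:
--         raise ValueError(f"Line out of range: {line}")
--     line_end = text.find("\n", offset)
--     if line_end == -1:
--         line_end = text_len
--     if offset + col > line_end:
--         raise ValueError(
--             f"Column out of range for line {line}: {col} > {line_end - offset}"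
--         )
--     return offset + col
-- ===== SOURCE B (Python) =====
-- def _line_col_to_offset(text: str, line: int, col: int) -> int:
--     if line < 0 or col < 0:
--         raise ValueError(f"Negative line/column not allowed: line={line}, col={col}")
--     lines = text.split("\n")
--     if line >= len(lines):
--         raise ValueError(f"Line out of range: {line}")
--     if col > len(lines[line]):
--         if line == 0:
--             raise ValueError(f"Column out of range for line 0: {col}")
--         raise ValueError(
--             f"Column out of range for line {line}: {col} > {len(lines[line])}"
--         )
--     return sum(len(l) + 1 for l in lines[:line]) + col
-- ===== Notes on version B (the rewrite author's own statement) =====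
-- stated objective: simpler
-- what changed: B splits the text into a line list once and uses direct length checks plus a prefix summation, replacing A's stateful while-loop that walks a character pointer via repeated str.find calls.
import Mathlib
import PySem

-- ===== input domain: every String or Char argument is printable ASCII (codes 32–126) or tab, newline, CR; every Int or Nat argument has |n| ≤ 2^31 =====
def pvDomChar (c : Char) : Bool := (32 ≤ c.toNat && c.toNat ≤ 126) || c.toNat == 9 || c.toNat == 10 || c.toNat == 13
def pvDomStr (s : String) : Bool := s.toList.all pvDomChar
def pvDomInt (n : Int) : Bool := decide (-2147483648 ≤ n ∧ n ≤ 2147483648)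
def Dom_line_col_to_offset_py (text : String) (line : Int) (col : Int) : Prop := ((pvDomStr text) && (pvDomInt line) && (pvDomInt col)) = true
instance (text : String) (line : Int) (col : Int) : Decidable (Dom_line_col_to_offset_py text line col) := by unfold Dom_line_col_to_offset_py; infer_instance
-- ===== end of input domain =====

-- B replaces A's pointer-walking while loop (repeated str.find) by one split into a line list,
-- direct range checks on it and a prefix-length summation; objective: simpler, same return values.

-- ===== PORT A =====
-- the 'while current_line < line and offset < text_len' loop; returns none where the loop raises
def pyALoop (cs : List Char) (line : Int) (cur : Int) (offset : Int) : Option (Int × Int) :=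
  if h : cur < line ∧ offset < (cs.length : Int) then
    let ni := PySem.Chars.findFrom cs ['\n'] offset
    if ni = -1 then none
    else pyALoop cs line (cur + 1) (ni + 1)
  else some (cur, offset)
termination_by (line - cur).toNat
decreasing_by omega

def line_col_to_offset_py (text : String) (line : Int) (col : Int) : Int :=
  let cs := text.toList
  if line < 0 ∨ col < 0 then 0  -- raise ValueError
  else if line = 0 then
    let first := PySem.List.pyGetD ((PySem.Chars.splitMax? cs ['\n'] 1).getD []) 0 []
    if col > (first.length : Int) then 0  -- raise ValueError
    else col
  else
    match pyALoop cs line 0 0 with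
    | none => 0  -- raise ValueError (no further newline)
    | some (cur, offset) =>
      if cur ≠ line then 0  -- raise ValueError
      else
        let le := PySem.Chars.findFrom cs ['\n'] offset
        let lineEnd := if le = -1 then (cs.length : Int) else le
        if offset + col > lineEnd then 0  -- raise ValueError
        else offset + col

-- ===== PORT B =====
def line_col_to_offset_py_alt (text : String) (line : Int) (col : Int) : Int :=
  if line < 0 ∨ col < 0 then 0  -- raise ValueError
  else
    let lines := (PySem.Chars.split? text.toList ['\n']).getD []
    if line ≥ (lines.length : Int) then 0  -- raise ValueError
    else
      let l := PySem.List.pyGetD lines line []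
      if col > (l.length : Int) then 0  -- raise ValueError
      else ((PySem.List.slice lines none (some line)).map (fun li => PySem.Chars.len li + 1)).sum + col

-- ===== PRECONDITION & SPEC =====
-- Pre_ excludes exactly the inputs on which A raises ValueError: negative line/col,
-- line not smaller than the number of '\n'-separated lines, or col past the end of that line.
def Pre_line_col_to_offset_py (text : String) (line : Int) (col : Int) : Prop :=
  0 ≤ line ∧ 0 ≤ col ∧
  line < ((PySem.Chars.splitOn text.toList ['\n']).length : Int) ∧
  col ≤ ((PySem.List.pyGetD (PySem.Chars.splitOn text.toList ['\n']) line []).length : Int)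
instance (text : String) (line : Int) (col : Int) : Decidable (Pre_line_col_to_offset_py text line col) := by unfold Pre_line_col_to_offset_py; infer_instance

def pvWitness_line_col_to_offset_py : String × Int × Int := ("ab\ncd\ne", 1, 2)

def Spec_line_col_to_offset_py (text : String) (line : Int) (col : Int) (out : Int) : Prop := out = line_col_to_offset_py_alt text line col
instance (text : String) (line : Int) (col : Int) (out : Int) : Decidable (Spec_line_col_to_offset_py text line col out) := by unfold Spec_line_col_to_offset_py; infer_instance

-- ===== CLAIM (what is proved, stated in full; the proofs are below) =====
def Claim_equal_line_col_to_offset_py : Prop := ∀ (text : String) (line : Int) (col : Int), Dom_line_col_to_offset_py text line col → Pre_line_col_to_offset_py text line col → Spec_line_col_to_offset_py text line col (line_col_to_offset_py text line col)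

-- ===== LEMMAS AND PROOFS =====

-- first line / remaining lines of a '\n'-split, by plain structural recursion (proof-side model)
def pvSplitNl : List Char → List Char × List (List Char)
  | [] => ([], [])
  | c :: r =>
    if c = '\n' then ([], (pvSplitNl r).1 :: (pvSplitNl r).2)
    else (c :: (pvSplitNl r).1, (pvSplitNl r).2)

def pvLines (cs : List Char) : List (List Char) := (pvSplitNl cs).1 :: (pvSplitNl cs).2

lemma pv_splitOn_go (l : List Char) : ∀ (fuel : Nat) (cur : List Char) (acc : List (List Char)),
    l.length < fuel →
    PySem.Chars.splitOn.go ['\n'] fuel l cur acc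
      = acc.reverse ++ (cur.reverse ++ (pvSplitNl l).1) :: (pvSplitNl l).2 := by
  induction l with
  | nil =>
    intro fuel cur acc h
    obtain ⟨f, rfl⟩ : ∃ f, fuel = f + 1 := ⟨fuel - 1, by omega⟩
    rw [PySem.Chars.splitOn.go]
    simp [pvSplitNl]
    omega
  | cons c rest ih =>
    intro fuel cur acc h
    obtain ⟨f, rfl⟩ : ∃ f, fuel = f + 1 := ⟨fuel - 1, by omega⟩
    rw [PySem.Chars.splitOn.go]
    by_cases hc : c = '\n'
    · subst hc
      simp only [List.length_cons] at h
      have hp : List.isPrefixOf ['\n'] ('\n' :: rest) = true := by simp [List.isPrefixOf]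
      rw [if_pos hp]
      rw [show List.drop (['\n'].length) ('\n' :: rest) = rest from rfl]
      rw [ih f [] (cur.reverse :: acc) (by omega)]
      simp [pvSplitNl]
    · have hpre : ['\n'].isPrefixOf (c :: rest) = false := by
        simp [List.isPrefixOf]; exact fun hh => absurd hh.symm hc
      rw [if_neg (by simp [hpre])]
      simp only [List.length_cons] at h
      rw [ih f (c :: cur) acc (by omega)]
      simp [pvSplitNl, hc]

lemma pv_splitOn_eq (cs : List Char) : PySem.Chars.splitOn cs ['\n'] = pvLines cs := by
  show PySem.Chars.splitOn.go ['\n'] (cs.length + 1) cs [] [] = _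
  rw [pv_splitOn_go cs (cs.length + 1) [] [] (by omega)]
  simp [pvLines]

lemma pv_split?_eq (cs : List Char) :
    (PySem.Chars.split? cs ['\n']).getD [] = pvLines cs := by
  rw [show PySem.Chars.split? cs ['\n'] = some (PySem.Chars.splitOn cs ['\n']) from rfl]
  rw [Option.getD_some, pv_splitOn_eq]

-- head of split(s, '\n', 1) is the first line
lemma pv_splitOnMax_go_m0 (fuel : Nat) (l : List Char) (acc : List (List Char)) :
    PySem.Chars.splitOnMax.go ['\n'] fuel 0 l [] acc = acc.reverse ++ [l] := by
  cases fuel with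
  | zero => rw [PySem.Chars.splitOnMax.go]; cases l <;> simp
  | succ f =>
    cases l with
    | nil => rw [PySem.Chars.splitOnMax.go]; simp; omega
    | cons c rest => rw [PySem.Chars.splitOnMax.go]; simp

lemma pv_splitOnMax_go_m1 (l : List Char) : ∀ (fuel : Nat) (cur : List Char),
    l.length < fuel →
    ∃ rem, PySem.Chars.splitOnMax.go ['\n'] fuel 1 l cur []
      = (cur.reverse ++ (pvSplitNl l).1) :: rem := by
  induction l with
  | nil =>
    intro fuel cur h
    obtain ⟨f, rfl⟩ : ∃ f, fuel = f + 1 := ⟨fuel - 1, by omega⟩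
    rw [PySem.Chars.splitOnMax.go]
    exact ⟨[], by simp [pvSplitNl]⟩
    omega
  | cons c rest ih =>
    intro fuel cur h
    obtain ⟨f, rfl⟩ : ∃ f, fuel = f + 1 := ⟨fuel - 1, by omega⟩
    simp only [List.length_cons] at h
    rw [PySem.Chars.splitOnMax.go]
    by_cases hc : c = '\n'
    · subst hc
      have hp : List.isPrefixOf ['\n'] ('\n' :: rest) = true := by simp [List.isPrefixOf]
      rw [if_neg (by omega), if_pos hp]
      rw [show List.drop (['\n'].length) ('\n' :: rest) = rest from rfl]
      rw [show (1 : Nat) - 1 = 0 from rfl]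
      rw [pv_splitOnMax_go_m0 f rest [cur.reverse]]
      exact ⟨[rest], by simp [pvSplitNl]⟩
    · have hpre : List.isPrefixOf ['\n'] (c :: rest) = false := by
        simp [List.isPrefixOf]; exact fun hh => absurd hh.symm hc
      rw [if_neg (by omega), if_neg (by simp [hpre])]
      obtain ⟨rem, hrem⟩ := ih f (c :: cur) (by omega)
      exact ⟨rem, by rw [hrem]; simp [pvSplitNl, hc]⟩

lemma pv_splitMax1_head (cs : List Char) :
    PySem.List.pyGetD ((PySem.Chars.splitMax? cs ['\n'] 1).getD []) 0 [] = (pvSplitNl cs).1 := by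
  rw [show PySem.Chars.splitMax? cs ['\n'] 1 = some (PySem.Chars.splitOnMax cs ['\n'] 1) from rfl]
  rw [Option.getD_some]
  rw [show PySem.Chars.splitOnMax cs ['\n'] 1
      = PySem.Chars.splitOnMax.go ['\n'] (cs.length + 1) 1 cs [] [] from rfl]
  obtain ⟨rem, hrem⟩ := pv_splitOnMax_go_m1 cs (cs.length + 1) [] (by omega)
  rw [hrem]
  simp [PySem.List.pyGetD_zero_cons]

-- find '\n'
lemma pv_mem_iff (cs : List Char) : '\n' ∈ cs ↔ (pvSplitNl cs).2 ≠ [] := by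
  induction cs with
  | nil => simp [pvSplitNl]
  | cons c rest ih =>
    by_cases hc : c = '\n'
    · subst hc; simp [pvSplitNl]
    · simp [pvSplitNl, hc, ih, Ne.symm hc]

lemma pv_not_mem (cs : List Char) (h : '\n' ∉ cs) : (pvSplitNl cs).1 = cs := by
  induction cs with
  | nil => simp [pvSplitNl]
  | cons c rest ih =>
    simp only [List.mem_cons, not_or] at h
    simp [pvSplitNl, Ne.symm h.1, ih h.2]

lemma pv_find_go (l : List Char) : ∀ (k : Nat),
    PySem.Chars.find.go ['\n'] l k
      = if '\n' ∈ l then ((k + (pvSplitNl l).1.length : Nat) : Int) else -1 := by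
  induction l with
  | nil => intro k; rw [PySem.Chars.find.go]; simp
  | cons c rest ih =>
    intro k
    rw [PySem.Chars.find.go]
    by_cases hc : c = '\n'
    · subst hc
      have hp : List.isPrefixOf ['\n'] ('\n' :: rest) = true := by simp [List.isPrefixOf]
      rw [if_pos hp]
      simp [pvSplitNl]
    · have hpre : List.isPrefixOf ['\n'] (c :: rest) = false := by
        simp [List.isPrefixOf]; exact fun hh => absurd hh.symm hc
      rw [if_neg (by simp [hpre])]
      rw [ih (k + 1)]
      by_cases hm : '\n' ∈ rest
      · simp [hm, hc, Ne.symm hc, pvSplitNl]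
        omega
      · simp [hm, Ne.symm hc]

lemma pv_find (l : List Char) :
    PySem.Chars.find l ['\n'] = if '\n' ∈ l then ((pvSplitNl l).1.length : Int) else -1 := by
  rw [show PySem.Chars.find l ['\n'] = PySem.Chars.find.go ['\n'] l 0 from rfl]
  rw [pv_find_go l 0]
  simp

lemma pv_decomp (l : List Char) (h : '\n' ∈ l) :
    ∃ r, l = (pvSplitNl l).1 ++ '\n' :: r ∧ (pvSplitNl l).2 = pvLines r := by
  induction l with
  | nil => simp at h
  | cons c rest ih =>
    by_cases hc : c = '\n'
    · subst hc
      exact ⟨rest, by simp [pvSplitNl, pvLines]⟩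
    · have hm : '\n' ∈ rest := by
        rcases List.mem_cons.mp h with h1 | h1
        · exact absurd h1.symm hc
        · exact h1
      obtain ⟨r, hr1, hr2⟩ := ih hm
      refine ⟨r, ?_, ?_⟩
      · simp only [pvSplitNl, if_neg (by exact fun hh => hc hh)]
        simpa using hr1
      · simp only [pvSplitNl, if_neg (by exact fun hh => hc hh)]
        exact hr2

-- sum of (len+1) over the first m lines
def pvS (ls : List (List Char)) (m : Nat) : Int := ((ls.take m).map (fun l => (l.length : Int) + 1)).sum

lemma pv_aLoop_spec (m : Nat) : ∀ (cs : List Char) (off : Nat) (line cur : Int),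
    cur + m = line → off ≤ cs.length → m < (pvLines (cs.drop off)).length →
    ∃ off' : Nat, pyALoop cs line cur off = some (line, (off' : Int)) ∧
      off' ≤ cs.length ∧
      pvLines (cs.drop off') = (pvLines (cs.drop off)).drop m ∧
      (off' : Int) = off + pvS (pvLines (cs.drop off)) m := by
  induction m with
  | zero =>
    intro cs off line cur hline hoff _
    refine ⟨off, ?_, hoff, by simp, by simp [pvS]⟩
    rw [pyALoop]
    rw [dif_neg (by omega)]
    simp only [Option.some.injEq, Prod.mk.injEq]
    exact ⟨by omega, trivial⟩
  | succ m ih =>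
    intro cs off line cur hline hoff hlen
    have h2ne : (pvSplitNl (cs.drop off)).2 ≠ [] := by
      simp only [pvLines, List.length_cons] at hlen
      intro hnil
      rw [hnil] at hlen
      simp at hlen
    have hmem : '\n' ∈ cs.drop off := (pv_mem_iff _).mpr h2ne
    have hne : cs.drop off ≠ [] := by
      intro hnil; rw [hnil] at hmem; simp at hmem
    have hofflt : off < cs.length := by
      by_contra hge
      exact hne (List.drop_eq_nil_of_le (by omega))
    obtain ⟨r, hr1, hr2⟩ := pv_decomp (cs.drop off) hmem
    have hSstep : pvS (pvLines (cs.drop off)) (m + 1)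
        = ((pvSplitNl (cs.drop off)).1.length + 1) + pvS ((pvSplitNl (cs.drop off)).2) m := by
      simp [pvLines, pvS, List.take_succ_cons]
    set a := (pvSplitNl (cs.drop off)).1 with ha
    have hlen1 : (cs.drop off).length = a.length + 1 + r.length := by
      rw [hr1]; simp; omega
    have hdroplen : (cs.drop off).length = cs.length - off := by simp
    rw [pyALoop]
    rw [dif_pos ⟨by omega, by exact_mod_cast hofflt⟩]
    rw [PySem.Chars.findFrom_natCast cs ['\n'] off (by omega)]
    rw [pv_find (cs.drop off)]
    rw [if_pos hmem]
    rw [← ha]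
    rw [if_neg (by omega)]
    rw [if_neg (by omega)]
    have hcast : (off : Int) + (a.length : Int) + 1
        = ((off + a.length + 1 : Nat) : Int) := by push_cast; ring
    rw [hcast]
    have hdrop2 : cs.drop (off + a.length + 1) = r := by
      have hdd : (cs.drop off).drop (a.length + 1) = cs.drop (off + a.length + 1) := by
        rw [List.drop_drop]; ring_nf
      rw [← hdd, hr1]
      rw [show a ++ '\n' :: r = (a ++ ['\n']) ++ r by simp]
      rw [show a.length + 1 = (a ++ ['\n']).length by simp]
      exact List.drop_left
    have hconsr : pvLines (cs.drop off) = a :: pvLines r := by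
      rw [pvLines, ← hr2, ← ha]
    obtain ⟨off', hloop, hle, hlines, hsum⟩ :=
      ih cs (off + a.length + 1) line (cur + 1)
        (by push_cast at hline ⊢; omega) (by omega)
        (by rw [hdrop2, ← hr2]
            simp only [pvLines, List.length_cons] at hlen ⊢
            omega)
    refine ⟨off', hloop, hle, ?_, ?_⟩
    · rw [hlines, hdrop2, hconsr, List.drop_succ_cons]
    · rw [hsum, hdrop2, hSstep, hr2]
      push_cast
      ring

-- ===== VERDICT (by name: the statement is the Claim_ definition above) =====
theorem line_col_to_offset_py_spec : Claim_equal_line_col_to_offset_py := by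
  intro text line col _ hpre
  obtain ⟨h0, h1, h2, h3⟩ := hpre
  rw [pv_splitOn_eq] at h2 h3
  show line_col_to_offset_py text line col = line_col_to_offset_py_alt text line col
  have hneg : ¬ (line < 0 ∨ col < 0) := by omega
  by_cases hl0 : line = 0
  · subst hl0
    have hfirst : PySem.List.pyGetD (pvLines text.toList) 0 [] = (pvSplitNl text.toList).1 := by
      simp [pvLines, PySem.List.pyGetD_zero_cons]
    rw [hfirst] at h3
    simp only [line_col_to_offset_py, line_col_to_offset_py_alt]
    rw [pv_split?_eq, pv_splitMax1_head, hfirst]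
    rw [PySem.List.slice_to (pvLines text.toList) (le_refl 0)]
    have hc : ¬ col > ((pvSplitNl text.toList).1.length : Int) := by omega
    have hg : ¬ ((0:Int) ≥ ((pvLines text.toList).length : Int)) := by omega
    have hne : pvLines text.toList ≠ [] := by simp [pvLines]
    simp [hc, hne]
  · have hm0 : (0 : Int) + (line.toNat : Int) = line := by omega
    obtain ⟨off', hloop, hle, hlines, hsum⟩ :=
      pv_aLoop_spec line.toNat text.toList 0 line 0 hm0 (by omega)
        (by simp only [List.drop_zero]; omega)
    simp only [List.drop_zero] at hlines hsum
    have hsum0 : (off' : Int) = pvS (pvLines text.toList) line.toNat := by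
      rw [hsum]; simp
    have hmlt : line.toNat < (pvLines text.toList).length := by omega
    have hl : PySem.List.pyGetD (pvLines text.toList) line []
        = (pvLines text.toList)[line.toNat] := PySem.List.pyGetD_eq_getElem _ _ h0 (by omega)
    set l := (pvLines text.toList)[line.toNat] with hldef
    rw [hl] at h3
    have hdropm : (pvLines text.toList).drop line.toNat
        = l :: (pvLines text.toList).drop (line.toNat + 1) := List.drop_eq_getElem_cons hmlt
    have hcons : pvLines (text.toList.drop off')
        = l :: (pvLines text.toList).drop (line.toNat + 1) := hlines.trans hdropm
    have hfst : (pvSplitNl (text.toList.drop off')).1 = l := by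
      have h' := congrArg List.head? hcons
      simpa [pvLines] using h'
    have hsuffixlen : (text.toList.drop off').length = text.toList.length - off' := by simp
    have hLE : (if PySem.Chars.findFrom text.toList ['\n'] (off' : Int) = -1
          then ((text.toList.length : Int))
          else PySem.Chars.findFrom text.toList ['\n'] (off' : Int))
        = (off' : Int) + (l.length : Int) := by
      rw [PySem.Chars.findFrom_natCast text.toList ['\n'] off' hle, pv_find]
      by_cases hmem : '\n' ∈ text.toList.drop off'
      · rw [if_pos hmem, hfst]
        rw [if_neg (by omega)]
        rw [if_neg (by omega)]
      · rw [if_neg hmem, if_pos rfl, if_pos rfl]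
        have he : text.toList.drop off' = l := by rw [← hfst]; exact (pv_not_mem _ hmem).symm
        have he2 : (text.toList.drop off').length = l.length := by rw [he]
        omega
    simp only [line_col_to_offset_py, line_col_to_offset_py_alt]
    rw [pv_split?_eq]
    rw [if_neg hneg]
    rw [if_neg hneg]
    rw [if_neg hl0]
    simp only [Nat.cast_zero] at hloop
    rw [hloop]
    simp only []
    rw [if_neg (by simp : ¬ (line ≠ line))]
    rw [hLE]
    rw [if_neg (by omega : ¬ ((off' : Int) + col > (off' : Int) + (l.length : Int)))]
    rw [if_neg (by omega : ¬ (line ≥ ((pvLines text.toList).length : Int)))]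
    rw [hl]
    rw [if_neg (by omega : ¬ (col > (l.length : Int)))]
    rw [PySem.List.slice_to _ h0]
    rw [hsum0]
    simp [pvS, PySem.Chars.len_eq]
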